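-- pv_equiv track=rewrite | github.com/innova-space-edu/control-acceso-panel | importar_alumnos.py | verificar_dv
-- ===== SOURCE A (Python) =====
-- def verificar_dv(rut: str) -> bool:
--     try:
--         limpio = rut.replace(".", "")
--         cuerpo_str, dv = limpio.split("-")
--         cuerpo = int(cuerpo_str)
--         suma, mul = 0, 2
--         n = cuerpo
--         while n:
--             suma += (n % 10) * mul
--             n //= 10
--             mul = mul + 1 if mul < 7 else 2
--         r = 11 - (suma % 11)
--         esperado = "0" if r == 11 else "K" if r == 10 else str(r)
--         return dv.upper() == esperado
--     except Exception:
--         return False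
-- ===== SOURCE B (Python) =====
-- def verificar_dv(rut: str) -> bool:
--     try:
--         limpio = rut.replace(".", "")
--         cuerpo_str, dv = limpio.split("-")
--         cuerpo = int(cuerpo_str)
--         suma = sum(int(ch) * (2 + i % 6) for i, ch in enumerate(reversed(str(cuerpo))))
--         r = 11 - suma % 11
--         esperado = "0" if r == 11 else "K" if r == 10 else str(r)
--         return dv.upper() == esperado
--     except Exception:
--         return False
-- ===== Notes on version B (the rewrite author's own statement) =====
-- stated objective: idiomatic
-- what changed: The imperative while-loop with a mutable cycling multiplier (n%10, n//=10, mul reset at 7) is replaced by a single sum() comprehension over enumerate(reversed(str(cuerpo))) with the positional closed-form weight 2 + i % 6.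
import Mathlib
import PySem

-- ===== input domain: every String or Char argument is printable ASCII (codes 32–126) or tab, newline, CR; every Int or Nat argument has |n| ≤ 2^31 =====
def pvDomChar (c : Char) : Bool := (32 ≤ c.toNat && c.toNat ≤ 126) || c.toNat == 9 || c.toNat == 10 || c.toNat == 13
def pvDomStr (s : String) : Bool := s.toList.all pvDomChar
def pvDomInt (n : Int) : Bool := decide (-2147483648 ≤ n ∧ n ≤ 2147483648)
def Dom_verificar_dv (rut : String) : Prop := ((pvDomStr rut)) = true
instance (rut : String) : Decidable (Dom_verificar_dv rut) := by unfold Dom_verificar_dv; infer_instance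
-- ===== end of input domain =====

-- B replaces A's imperative while-loop with its mutable cycling multiplier by a sum over
-- enumerate(reversed(str(cuerpo))) with the closed-form positional weight 2 + i % 6 (idiomatic; same cost).

-- ===== PORT A =====
-- Python's `while n:` loop; `n ≤ 0` is the totalizing guard (for n < 0 Python's loop would never
-- terminate, unreachable here since cuerpo_str is a piece of split("-") and so contains no '-').
def pvLoopA (n suma mul : Int) : Int :=
  if n ≤ 0 then suma
  else pvLoopA (PySem.Int.floordiv n 10) (suma + PySem.Int.mod n 10 * mul)
       (if mul < 7 then mul + 1 else 2)
termination_by n.toNat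
decreasing_by
  simp only [PySem.Int.floordiv, Int.fdiv_eq_ediv]
  omega

def verificar_dv (rut : String) : Bool :=
  let limpio := PySem.Str.replace rut "." ""
  match PySem.Str.split? limpio "-" with
  | some [cuerpo_str, dv] =>
    match PySem.Int.ofStr? cuerpo_str with
    | some cuerpo =>
      let suma := pvLoopA cuerpo 0 2
      let r : Int := 11 - PySem.Int.mod suma 11
      let esperado : String := if r = 11 then "0" else if r = 10 then "K" else PySem.Int.toStr r
      PySem.Str.upper dv == esperado
    | none => false
  | _ => false

-- ===== PORT B =====
-- one step of the sum(): int(ch) * (2 + i % 6); int(ch) raising (none) aborts the sum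
def pvStep (acc : Option Int) (p : Int × Char) : Option Int :=
  acc.bind (fun s => (PySem.Int.ofChars? [p.2]).map (fun d => s + d * (2 + PySem.Int.mod p.1 6)))

-- sum(int(ch) * (2 + i % 6) for i, ch in enumerate(reversed(str(cuerpo))))
def pvSumB? (cs : List Char) : Option Int :=
  (PySem.List.enumerate cs 0).foldl pvStep (some 0)

def verificar_dv_alt (rut : String) : Bool :=
  let limpio := PySem.Str.replace rut "." ""
  (PySem.Str.split? limpio "-").elim false (fun partes =>
    match partes with
    | cuerpo_str :: rest1 =>
      match rest1 with
      | dv :: rest2 =>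
        match rest2 with
        | [] =>
          (PySem.Int.ofStr? cuerpo_str).elim false (fun cuerpo =>
            (pvSumB? ((PySem.Int.toChars cuerpo).reverse)).elim false (fun suma =>
              let r : Int := 11 - PySem.Int.mod suma 11
              let esperado : String := if r = 11 then "0" else if r = 10 then "K" else PySem.Int.toStr r
              PySem.Str.upper dv == esperado))
        | _ :: _ => false
      | [] => false
    | [] => false)

-- ===== PRECONDITION & SPEC =====
def Spec_verificar_dv (rut : String) (out : Bool) : Prop := out = verificar_dv_alt rut
instance (rut : String) (out : Bool) : Decidable (Spec_verificar_dv rut out) := by unfold Spec_verificar_dv; infer_instance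

-- ===== CLAIM (what is proved, stated in full; the proofs are below) =====
def Claim_equal_verificar_dv : Prop := ∀ (rut : String), Dom_verificar_dv rut → Spec_verificar_dv rut (verificar_dv rut)

-- ===== LEMMAS AND PROOFS =====

-- little-endian decimal digit characters of m (always at least one digit)
def pvLdc (m : Nat) : List Char :=
  if h : m < 10 then [Nat.digitChar m]
  else Nat.digitChar (m % 10) :: pvLdc (m / 10)
decreasing_by exact Nat.div_lt_self (by omega) (by omega)

theorem pv_toDigitsCore_eq_ldc : ∀ (fuel m : Nat) (acc : List Char), m < fuel →
    Nat.toDigitsCore 10 fuel m acc = (pvLdc m).reverse ++ acc := by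
  intro fuel
  induction fuel with
  | zero => omega
  | succ f ih =>
    intro m acc hm
    rw [Nat.toDigitsCore]
    by_cases h10 : m < 10
    · have : m / 10 = 0 := Nat.div_eq_of_lt h10
      simp [this, pvLdc, h10, Nat.mod_eq_of_lt h10]
    · have hne : ¬ m / 10 = 0 := by omega
      simp only [hne, if_false]
      rw [ih _ _ (by omega)]
      conv_rhs => rw [pvLdc]
      simp [h10]

theorem pv_toChars_reverse (n : Int) (h : 0 ≤ n) :
    (PySem.Int.toChars n).reverse = pvLdc n.toNat := by
  simp only [PySem.Int.toChars, not_lt.mpr h]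
  rw [show Nat.toDigits 10 n.toNat = Nat.toDigitsCore 10 (n.toNat + 1) n.toNat [] from rfl,
    pv_toDigitsCore_eq_ldc _ _ _ (Nat.lt_succ_self _)]
  simp

theorem pv_ofChars_digitChar (d : Nat) (h : d < 10) :
    PySem.Int.ofChars? [Nat.digitChar d] = some (d : Int) := by
  interval_cases d <;> decide

theorem pv_sum_ldc : ∀ (m k : Nat) (suma : Int),
    (PySem.List.enumerate (pvLdc m) (k : Int)).foldl pvStep (some suma)
      = some (pvLoopA (m : Int) suma (2 + (k : Int) % 6)) := by
  intro m
  induction m using Nat.strong_induction_on with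
  | _ m ih =>
    intro k suma
    by_cases h10 : m < 10
    · rw [pvLdc, dif_pos h10]
      rw [PySem.List.enumerate_cons, List.foldl_cons, PySem.List.enumerate_nil, List.foldl_nil]
      simp only [pvStep, pv_ofChars_digitChar m h10, Option.bind_some, Option.map_some]
      by_cases hm0 : m = 0
      · subst hm0
        rw [pvLoopA]
        norm_num
      · rw [pvLoopA, if_neg (by omega : ¬ (m : Int) ≤ 0)]
        rw [PySem.Int.floordiv_eq_ediv_of_pos (by norm_num : (0:Int) < 10)]
        rw [show (m : Int) / 10 = 0 by omega]
        rw [pvLoopA, if_pos (le_refl (0:Int))]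
        rw [PySem.Int.mod_eq_emod_of_pos (by norm_num : (0:Int) < 10)]
        rw [PySem.Int.mod_eq_emod_of_pos (by norm_num : (0:Int) < 6)]
        rw [show (m : Int) % 10 = (m : Int) by omega]
    · rw [pvLdc, dif_neg h10]
      rw [PySem.List.enumerate_cons, List.foldl_cons]
      simp only [pvStep, pv_ofChars_digitChar _ (Nat.mod_lt m (by omega) : m % 10 < 10), Option.bind_some, Option.map_some]
      rw [show ((k : Int) + 1) = ((k + 1 : Nat) : Int) by push_cast; ring]
      rw [ih (m / 10) (Nat.div_lt_self (by omega) (by omega))]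
      conv_rhs => rw [pvLoopA]
      rw [if_neg (by omega : ¬ (m : Int) ≤ 0)]
      rw [PySem.Int.floordiv_eq_ediv_of_pos (by norm_num : (0:Int) < 10)]
      rw [show (m : Int) / 10 = ((m / 10 : Nat) : Int) by omega]
      rw [PySem.Int.mod_eq_emod_of_pos (by norm_num : (0:Int) < 10)]
      rw [PySem.Int.mod_eq_emod_of_pos (by norm_num : (0:Int) < 6)]
      rw [show ((m % 10 : Nat) : Int) = (m : Int) % 10 by push_cast; ring]
      rw [show (2 + (((k + 1) : Nat) : Int) % 6)
            = (if 2 + (k : Int) % 6 < 7 then 2 + (k : Int) % 6 + 1 else 2) by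
          push_cast; split_ifs <;> omega]

theorem pv_sumB_eq_loop (n : Int) (h : 0 ≤ n) :
    pvSumB? ((PySem.Int.toChars n).reverse) = some (pvLoopA n 0 2) := by
  rw [pvSumB?, pv_toChars_reverse n h]
  have := pv_sum_ldc n.toNat 0 0
  simp only [Nat.cast_zero] at this
  rw [this, Int.toNat_of_nonneg h]
  norm_num

theorem pv_splitOn_go_no_dash : ∀ (fuel : Nat) (l cur : List Char) (acc : List (List Char)),
    l.length < fuel → '-' ∉ cur → (∀ p ∈ acc, '-' ∉ p) →
    ∀ p ∈ PySem.Chars.splitOn.go ['-'] fuel l cur acc, '-' ∉ p := by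
  intro fuel
  induction fuel with
  | zero => intro l cur acc h; omega
  | succ f ih =>
    intro l cur acc hlen hcur hacc p hp
    match l with
    | [] =>
      rw [PySem.Chars.splitOn.go] at hp
      · simp only [List.mem_reverse, List.mem_cons] at hp
        rcases hp with h1 | h2
        · subst h1; simp only [List.mem_reverse]; exact hcur
        · exact hacc _ h2
      · omega
    | c :: rest =>
      rw [PySem.Chars.splitOn.go] at hp
      by_cases hc : c = '-'
      · have hpre : List.isPrefixOf ['-'] (c :: rest) = true := by
          subst hc; simp [List.isPrefixOf]
        rw [if_pos hpre] at hp
        refine ih _ _ _ (by simp at hlen ⊢; omega) (by simp) ?_ p hp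
        intro q hq
        rcases List.mem_cons.mp hq with h1 | h2
        · subst h1; simp only [List.mem_reverse]; exact hcur
        · exact hacc _ h2
      · have hpre : ¬ List.isPrefixOf ['-'] (c :: rest) = true := by
          simp [List.isPrefixOf, BEq.beq]
          intro hcc
          exact hc hcc.symm
        rw [if_neg hpre] at hp
        refine ih _ _ _ (by simp at hlen ⊢; omega) ?_ hacc p hp
        intro hq
        rcases List.mem_cons.mp hq with h1 | h2
        · exact hc h1.symm
        · exact hcur h2

theorem pv_split_piece_no_dash (s : List Char) (p : List Char)
    (hp : p ∈ PySem.Chars.splitOn s ['-']) : '-' ∉ p := by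
  rw [PySem.Chars.splitOn] at hp
  exact pv_splitOn_go_no_dash _ _ _ _ (Nat.lt_succ_self _) (by simp) (by simp) p hp

theorem pv_ofChars_nonneg (cs : List Char) (h : '-' ∉ cs) (v : Int)
    (hv : PySem.Int.ofChars? cs = some v) : 0 ≤ v := by
  rw [PySem.Int.ofChars?] at hv
  set cs' := (List.dropWhile PySem.Int.isIntSpace (List.dropWhile PySem.Int.isIntSpace cs).reverse).reverse with hcs'
  have hsub : ∀ x ∈ cs', x ∈ cs := by
    intro x hx
    rw [hcs'] at hx
    simp only [List.mem_reverse] at hx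
    have h1 := (List.dropWhile_sublist (p := PySem.Int.isIntSpace)
      (l := (List.dropWhile PySem.Int.isIntSpace cs).reverse)).mem hx
    simp only [List.mem_reverse] at h1
    exact (List.dropWhile_sublist _).mem h1
  clear_value cs'
  clear hcs'
  split at hv
  · exact absurd (hsub '-' (by simp)) h
  · simp only [Option.map_eq_some_iff] at hv
    obtain ⟨w, hw, rfl⟩ := hv
    simp only [bind, Option.bind_eq_some_iff] at hw
    obtain ⟨a, ha, hpa⟩ := hw
    cases hpa
    positivity
  · simp only [Option.map_eq_some_iff] at hv
    obtain ⟨w, hw, rfl⟩ := hv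
    simp only [bind, Option.bind_eq_some_iff] at hw
    obtain ⟨a, ha, hpa⟩ := hw
    cases hpa
    positivity

theorem main_eq (rut : String) : verificar_dv rut = verificar_dv_alt rut := by
  unfold verificar_dv verificar_dv_alt
  simp only [PySem.Str.split?, PySem.Chars.split?, show ("-" : String).toList = ['-'] by decide,
    show (['-'] : List Char).isEmpty = false from rfl, Bool.false_eq_true, if_false,
    Option.map_some, Option.elim_some]
  rcases hL : PySem.Chars.splitOn (PySem.Str.replace rut "." "").toList ['-'] with _ | ⟨p0, t⟩
  · rfl
  · rcases t with _ | ⟨p1, t'⟩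
    · rfl
    · rcases t' with _ | ⟨p2, t''⟩
      · simp only [List.map]
        cases hof : PySem.Int.ofStr? (String.ofList p0) with
        | none => rfl
        | some cuerpo =>
          simp only [Option.elim_some]
          have hnd : '-' ∉ p0 := pv_split_piece_no_dash _ _ (by rw [hL]; simp)
          have hnn : 0 ≤ cuerpo := pv_ofChars_nonneg p0 hnd cuerpo (by
            rw [← hof, PySem.Int.ofStr?, String.toList_ofList])
          rw [pv_sumB_eq_loop cuerpo hnn, Option.elim_some]
      · rfl

-- ===== VERDICT (by name: the statement is the Claim_ definition above) =====
theorem verificar_dv_spec : Claim_equal_verificar_dv := by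
  intro rut _
  unfold Spec_verificar_dv
  exact main_eq rut
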